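-- pv_equiv track=rewrite | github.com/eloqlo/Code_Interview | python_Algorithm/Code_Interview_Book/dynamic_programming/380.py | solution
-- ===== SOURCE A (Python) =====
-- def solution(arr):
--     tmp=[]
--     for ele in arr:
--         if len(tmp)==0:
--             tmp.append(ele)
--             continue
--         tmp = get_arr(tmp, ele)
--     return len(arr)-len(tmp)
--
-- def get_arr(tmp, ele):
--     if tmp[-1] > ele:
--         tmp.append(ele)
--         return tmp
--
--     # Binary Search
--     st = 0
--     ed = len(tmp)-1
--     for _ in range(len(tmp)+1):
--         mid = (st+ed)//2
--         if tmp[mid] == ele: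
--             return tmp
--         elif ele < tmp[mid]:
--             st = mid+1
--         else:
--             ed = mid-1
--
--         if st>ed:
--             idx = max(st,ed)
--             tmp[idx] = ele
--             break
--     return tmp
-- ===== SOURCE B (Python) =====
-- def solution(arr):
--     # Quadratic DP: dp entry (value, length of the longest strictly decreasing
--     # subsequence ending at that element); answer = len(arr) - max length.
--     dp = []
--     for x in arr:
--         best = 0
--         for y, d in dp:
--             if y > x and best < d:
--                 best = d
--         dp.append((x, best + 1))
--     best = 0
--     for _, d in dp:
--         if best < d:
--             best = d
--     return len(arr) - best
-- ===== Notes on version B (the rewrite author's own statement) =====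
-- stated objective: alternative
-- what changed: Replaced patience sorting (a maintained pile-tops list updated by hand-written binary search) with a self-contained quadratic DP over longest strictly-decreasing-subsequence lengths ending at each element.
import Mathlib
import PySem

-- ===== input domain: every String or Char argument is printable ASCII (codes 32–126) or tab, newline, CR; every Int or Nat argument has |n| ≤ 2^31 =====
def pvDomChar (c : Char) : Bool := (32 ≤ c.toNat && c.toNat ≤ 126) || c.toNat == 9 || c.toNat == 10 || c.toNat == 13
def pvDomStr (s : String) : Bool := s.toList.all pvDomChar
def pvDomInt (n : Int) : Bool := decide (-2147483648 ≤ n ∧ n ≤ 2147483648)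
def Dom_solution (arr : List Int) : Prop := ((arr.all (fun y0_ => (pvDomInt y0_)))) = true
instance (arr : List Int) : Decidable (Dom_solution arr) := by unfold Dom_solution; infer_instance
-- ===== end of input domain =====

-- B replaces A's patience-sorting (pile-tops list + hand-written binary search) by a
-- self-contained quadratic DP over longest strictly-decreasing-subsequence lengths ending
-- at each element; same return value, no speed claim (B is the simpler, slower algorithm).


-- ===== PORT A =====
-- the `for _ in range(len(tmp)+1)` binary-search loop of get_arr, fuel = len(tmp)+1.
-- tmp[mid] is ported as (pyGet? …).getD 0: on every call A makes, 0 ≤ st ≤ mid ≤ ed < len(tmp),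
-- so the index is in range and the default is never taken; likewise idx = max st' ed' ≥ st ≥ 0,
-- so .toNat is exact (Python never sees a negative index here).
def getArrLoop (tmp : List Int) (ele : Int) : Int → Int → Nat → List Int
  | _, _, 0 => tmp
  | st, ed, fuel+1 =>
    let mid := PySem.Int.floordiv (st + ed) 2
    let v := (PySem.List.pyGet? tmp mid).getD 0
    if v = ele then tmp
    else
      let st' := if ele < v then mid + 1 else st
      let ed' := if ele < v then ed else mid - 1
      if st' > ed' then tmp.set (max st' ed').toNat ele
      else getArrLoop tmp ele st' ed' fuel

-- get_arr; tmp[-1] ported as (pyGet? tmp (-1)).getD 0 (A only calls it with tmp nonempty)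
def getArr (tmp : List Int) (ele : Int) : List Int :=
  if (PySem.List.pyGet? tmp (-1)).getD 0 > ele then tmp ++ [ele]
  else getArrLoop tmp ele 0 ((tmp.length : Int) - 1) (tmp.length + 1)

-- body of A's main loop
def aStep (tmp : List Int) (ele : Int) : List Int :=
  if tmp.length == 0 then tmp ++ [ele] else getArr tmp ele

def solution (arr : List Int) : Int :=
  (arr.length : Int) - ((arr.foldl aStep []).length : Int)

-- ===== PORT B =====
-- inner loop of Source B: best over dp entries (y, d) with y > x
def bBest (dp : List (Int × Int)) (x : Int) : Int :=
  dp.foldl (fun best p => if p.1 > x ∧ best < p.2 then p.2 else best) 0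

-- body of B's main loop: append (x, best+1)
def bStep (dp : List (Int × Int)) (x : Int) : List (Int × Int) :=
  dp ++ [(x, bBest dp x + 1)]

def solution_alt (arr : List Int) : Int :=
  (arr.length : Int) - (arr.foldl bStep []).foldl (fun best p => if best < p.2 then p.2 else best) 0

-- ===== PRECONDITION & SPEC =====
def Spec_solution (arr : List Int) (out : Int) : Prop := out = solution_alt arr
instance (arr : List Int) (out : Int) : Decidable (Spec_solution arr out) := by unfold Spec_solution; infer_instance

-- ===== CLAIM (what is proved, stated in full; the proofs are below) =====
def Claim_equal_solution : Prop := ∀ (arr : List Int), Dom_solution arr → Spec_solution arr (solution arr)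

-- ===== LEMMAS AND PROOFS =====

-- number of leading elements of tmp that are > x (tmp is kept strictly decreasing by A)
def pos (tmp : List Int) (x : Int) : Nat :=
  match tmp with
  | [] => 0
  | v :: t => if x < v then pos t x + 1 else 0

-- abstract one-element update both programs realize on the pile-tops list
def pstep (tmp : List Int) (x : Int) : List Int :=
  if pos tmp x = tmp.length then tmp ++ [x] else tmp.set (pos tmp x) x

lemma pos_le_length (tmp : List Int) (x : Int) : pos tmp x ≤ tmp.length := by
  induction tmp with
  | nil => simp [pos]
  | cons v t ih => simp only [pos, List.length_cons]; split; · omega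
                   · omega

-- on a strictly decreasing list, the > x entries are exactly the first (pos tmp x) ones
lemma pos_char (tmp : List Int) (x : Int) (hp : tmp.Pairwise (· > ·)) (i : Nat) (hi : i < tmp.length) :
    (i < pos tmp x ↔ x < tmp[i]) := by
  induction tmp generalizing i with
  | nil => simp at hi
  | cons v t ih =>
    rw [List.pairwise_cons] at hp
    simp only [pos]
    split
    · rename_i hxv
      cases i with
      | zero => simpa using hxv
      | succ j =>
        simp only [List.getElem_cons_succ]
        rw [Nat.succ_lt_succ_iff]
        exact ih hp.2 j (by simpa using hi)
    · rename_i hxv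
      cases i with
      | zero => simpa using hxv
      | succ j =>
        simp only [List.getElem_cons_succ]
        have hj : j < t.length := by simpa using hi
        have hvt : v > t[j] := hp.1 _ (List.getElem_mem hj)
        omega

lemma set_self (l : List Int) (i : Nat) (a : Int) (ha : l[i]? = some a) :
    l.set i a = l := by
  apply List.ext_getElem (by simp)
  intro k hk hk'
  rw [List.getElem_set]
  split
  · rename_i hik
    subst hik
    rw [List.getElem?_eq_getElem hk'] at ha
    exact (Option.some_inj.mp ha).symm
  · rfl

-- binary-search loop correctness: with the scanning invariant it lands exactly on pos tmp x
lemma getArrLoop_eq (tmp : List Int) (x : Int) (hp : tmp.Pairwise (· > ·))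
    (hposlt : pos tmp x < tmp.length) :
    ∀ (fuel : Nat) (st ed : Int), 0 ≤ st → ed < (tmp.length : Int) → st ≤ ed →
    (st : Int) ≤ (pos tmp x : Int) → (pos tmp x : Int) ≤ ed + 1 →
    ed - st < (fuel : Int) →
    getArrLoop tmp x st ed fuel = tmp.set (pos tmp x) x := by
  intro fuel
  induction fuel with
  | zero => intro st ed _ _ _ _ _ hf; omega
  | succ n ih =>
    intro st ed hst hed hstle hpl hpr _
    have hmid := PySem.Int.floordiv_two_mid_bounds (lo := st) (hi := ed) hstle
    set mid := PySem.Int.floordiv (st + ed) 2 with hmiddef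
    have hmid0 : 0 ≤ mid := by omega
    have hmidlen : mid.toNat < tmp.length := by omega
    have hget : (PySem.List.pyGet? tmp mid).getD 0 = tmp[mid.toNat] := by
      rw [PySem.List.pyGet?_eq_some_getElem (xs := tmp) (i := mid) hmid0 (by omega)]; rfl
    have hcast : (mid.toNat : Int) = mid := by omega
    -- facts from pos_char at mid
    have hchar := pos_char tmp x hp
    simp only [getArrLoop]
    rw [← hmiddef, hget]
    split
    · -- tmp[mid] = x: the loop returns tmp unchanged; pos = mid and set is a no-op
      rename_i hveq
      have hveq' : tmp[mid.toNat] = x := hveq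
      have h1 : ¬ (mid.toNat < pos tmp x) := by
        have := hchar mid.toNat hmidlen; omega
      have h2 : ¬ (pos tmp x < mid.toNat) := by
        intro hlt
        have hgt : tmp[pos tmp x] > tmp[mid.toNat] :=
          List.pairwise_iff_getElem.mp hp (pos tmp x) mid.toNat hposlt hmidlen hlt
        have := (hchar (pos tmp x) hposlt).mpr (by omega)
        omega
      have hpm : pos tmp x = mid.toNat := by omega
      rw [set_self tmp (pos tmp x) x
        (by rw [hpm, List.getElem?_eq_getElem hmidlen, hveq'])]
    · rename_i hvne
      by_cases hxv : x < tmp[mid.toNat]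
      · -- go right: st' = mid+1
        have hposge : (mid + 1 : Int) ≤ (pos tmp x : Int) := by
          have := (hchar mid.toNat hmidlen).mpr hxv
          omega
        simp only [if_pos hxv]
        by_cases hbr : mid + 1 > ed
        · rw [if_pos hbr]
          have hidx : max (mid + 1) ed = mid + 1 := by omega
          have hpeq : (mid + 1).toNat = pos tmp x := by omega
          rw [hidx, hpeq]
        · rw [if_neg hbr]
          exact ih (mid + 1) ed (by omega) hed (by omega) hposge hpr (by omega)
      · -- go left: ed' = mid-1  (here tmp[mid] < x since ≠)
        have hvlt : tmp[mid.toNat] < x := by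
          rcases lt_trichotomy tmp[mid.toNat] x with h | h | h
          · exact h
          · exact absurd h hvne
          · exact absurd h hxv
        have hposle : (pos tmp x : Int) ≤ mid := by
          have := (hchar mid.toNat hmidlen)
          omega
        simp only [if_neg hxv]
        by_cases hbr : st > mid - 1
        · rw [if_pos hbr]
          have hidx : max st (mid - 1) = st := by omega
          have hpeq : st.toNat = pos tmp x := by omega
          rw [hidx, hpeq]
        · rw [if_neg hbr]
          exact ih st (mid - 1) hst (by omega) (by omega) hpl (by omega) (by omega)

lemma getArr_eq_pstep (tmp : List Int) (x : Int) (hne : tmp ≠ [])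
    (hp : tmp.Pairwise (· > ·)) : getArr tmp x = pstep tmp x := by
  have hlen : 0 < tmp.length := List.length_pos_iff.mpr hne
  have hlast : (PySem.List.pyGet? tmp (-1)).getD 0 = tmp[tmp.length - 1] := by
    rw [PySem.List.pyGet?_neg_one, List.getLast?_eq_getElem?, List.getElem?_eq_getElem (by omega)]
    rfl
  have hchar := pos_char tmp x hp
  unfold getArr
  rw [hlast]
  by_cases hgt : tmp[tmp.length - 1] > x
  · -- append: every entry is > x, so pos = length
    rw [if_pos hgt]
    have hall : ∀ (i : Nat) (hi : i < tmp.length), x < tmp[i] := by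
      intro i hi
      rcases Nat.lt_or_ge i (tmp.length - 1) with h | h
      · have := List.pairwise_iff_getElem.mp hp i (tmp.length - 1) hi (by omega) h
        omega
      · have : i = tmp.length - 1 := by omega
        subst this; omega
    have hpos : pos tmp x = tmp.length := by
      by_contra hne'
      have hlt : pos tmp x < tmp.length := lt_of_le_of_ne (pos_le_length tmp x) hne'
      have := (hchar (pos tmp x) hlt).mpr (hall _ hlt)
      omega
    rw [pstep, if_pos hpos]
  · rw [if_neg hgt]
    have hposlt : pos tmp x < tmp.length := by
      by_contra h
      have hpos : pos tmp x = tmp.length := by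
        have := pos_le_length tmp x; omega
      have := (hchar (tmp.length - 1) (by omega)).mp (by omega)
      omega
    rw [getArrLoop_eq tmp x hp hposlt (tmp.length + 1) 0 ((tmp.length : Int) - 1)
      (by omega) (by omega) (by omega) (by omega) (by omega) (by omega)]
    rw [pstep, if_neg (by omega)]

lemma aStep_eq_pstep (tmp : List Int) (x : Int) (hp : tmp.Pairwise (· > ·)) :
    aStep tmp x = pstep tmp x := by
  unfold aStep
  by_cases h : tmp = []
  · subst h; simp [pstep, pos]
  · rw [if_neg (by simpa using List.length_pos_iff.mpr h |>.ne'), getArr_eq_pstep tmp x h hp]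

-- the invariant tying B's dp table to A's pile-tops list:
-- tmp is strictly decreasing; every dp length is in [1, len tmp]; tmp[k] is the maximum
-- value among dp entries of length k+1, and each such class is nonempty.
def DPInv (dp : List (Int × Int)) (tmp : List Int) : Prop :=
  tmp.Pairwise (· > ·) ∧
  (∀ p ∈ dp, 1 ≤ p.2 ∧ p.2 ≤ (tmp.length : Int)) ∧
  (∀ (k : Nat) (h : k < tmp.length), ∃ p ∈ dp, p.2 = (k : Int) + 1 ∧ p.1 = tmp[k]) ∧
  (∀ p ∈ dp, ∀ (k : Nat) (h : k < tmp.length), p.2 = (k : Int) + 1 → p.1 ≤ tmp[k])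

-- generic facts about left folds that only ever increase the accumulator
lemma foldl_ge_init (g : Int → Int × Int → Int) (h1 : ∀ b p, b ≤ g b p) :
    ∀ (dp : List (Int × Int)) (init : Int), init ≤ dp.foldl g init := by
  intro dp
  induction dp with
  | nil => simp
  | cons p t ih => intro init; exact le_trans (h1 init p) (ih (g init p))

lemma foldl_ge_mem (g : Int → Int × Int → Int) (h1 : ∀ b p, b ≤ g b p)
    (dp : List (Int × Int)) (p : Int × Int) (hp : p ∈ dp) (v : Int)
    (hv : ∀ b, v ≤ g b p) : ∀ init, v ≤ dp.foldl g init := by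
  induction dp with
  | nil => simp at hp
  | cons q t ih =>
    intro init
    rcases List.mem_cons.mp hp with h | h
    · subst h; exact le_trans (hv init) (foldl_ge_init g h1 t _)
    · exact ih h _

lemma foldl_le_bound (g : Int → Int × Int → Int) (c : Int) :
    ∀ (dp : List (Int × Int)), (∀ b p, p ∈ dp → b ≤ c → g b p ≤ c) →
    ∀ init, init ≤ c → dp.foldl g init ≤ c := by
  intro dp
  induction dp with
  | nil => intro _ init h; simpa using h
  | cons q t ih =>
    intro hg init hinit
    exact ih (fun b p hp hb => hg b p (List.mem_cons_of_mem _ hp) hb) _ (hg init q (List.mem_cons_self) hinit)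

lemma bBest_g_mono (x : Int) :
    ∀ (b : Int) (p : Int × Int), b ≤ (if p.1 > x ∧ b < p.2 then p.2 else b) := by
  intro b p; split <;> omega

lemma bBest_eq_pos (dp : List (Int × Int)) (tmp : List Int) (x : Int) (hInv : DPInv dp tmp) :
    bBest dp x = (pos tmp x : Int) := by
  obtain ⟨hp, hbound, hclass, hmax⟩ := hInv
  have hchar := pos_char tmp x hp
  apply le_antisymm
  · -- every contributing entry has length ≤ pos
    apply foldl_le_bound _ _ dp
    · intro b p hpmem hb
      split
      · rename_i hcond
        obtain ⟨h1, hlen⟩ := hbound p hpmem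
        set k : Nat := (p.2 - 1).toNat with hk
        have hklt : k < tmp.length := by omega
        have hp2 : p.2 = (k : Int) + 1 := by omega
        have hle := hmax p hpmem k hklt hp2
        have : x < tmp[k] := by omega
        have := (hchar k hklt).mpr this
        omega
      · exact hb
    · positivity
  · -- if pos ≥ 1 the class pos-1 provides a witness of length pos
    rcases Nat.eq_zero_or_pos (pos tmp x) with h0 | h0
    · rw [h0]; exact_mod_cast foldl_ge_init _ (bBest_g_mono x) dp 0
    · have hklt : pos tmp x - 1 < tmp.length := by
        have := pos_le_length tmp x; omega
      obtain ⟨p, hpmem, hp2, hp1⟩ := hclass (pos tmp x - 1) hklt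
      have hxlt : x < tmp[pos tmp x - 1] := (hchar _ hklt).mp (by omega)
      have hp2' : p.2 = (pos tmp x : Int) := by omega
      apply foldl_ge_mem _ (bBest_g_mono x) dp p hpmem
      intro b
      have hx1 : p.1 > x := by rw [hp1]; exact hxlt
      by_cases hb : b < p.2
      · rw [if_pos ⟨hx1, hb⟩]; omega
      · rw [if_neg (by tauto)]; omega

lemma DPInv_step (dp : List (Int × Int)) (tmp : List Int) (x : Int) (hInv : DPInv dp tmp) :
    DPInv (bStep dp x) (pstep tmp x) := by
  have hbb := bBest_eq_pos dp tmp x hInv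
  obtain ⟨hp, hbound, hclass, hmax⟩ := hInv
  have hchar := pos_char tmp x hp
  have hposle := pos_le_length tmp x
  unfold bStep pstep
  rw [hbb]
  by_cases hcase : pos tmp x = tmp.length
  · -- append case: every entry of tmp is > x
    rw [if_pos hcase]
    have hall : ∀ (i : Nat) (hi : i < tmp.length), x < tmp[i] := by
      intro i hi; exact (hchar i hi).mp (by omega)
    refine ⟨?_, ?_, ?_, ?_⟩
    · rw [List.pairwise_append]
      refine ⟨hp, by simp, ?_⟩
      intro a ha b hb
      simp only [List.mem_singleton] at hb
      subst hb
      obtain ⟨i, hi, rfl⟩ := List.mem_iff_getElem.mp ha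
      exact hall i hi
    · intro p hpm
      rcases List.mem_append.mp hpm with h | h
      · have := hbound p h; simp; omega
      · simp only [List.mem_singleton] at h
        subst h; simp; omega
    · intro k hk
      simp only [List.length_append, List.length_singleton] at hk
      rcases Nat.lt_or_ge k tmp.length with h | h
      · obtain ⟨p, hpm, h2, h1⟩ := hclass k h
        exact ⟨p, List.mem_append_left _ hpm, h2, by rw [List.getElem_append_left h]; exact h1⟩
      · have hkeq : k = tmp.length := by omega
        subst hkeq
        refine ⟨(x, (pos tmp x : Int) + 1), List.mem_append_right _ (by simp), by simp [hcase], ?_⟩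
        simp
    · intro p hpm k hk h2
      simp only [List.length_append, List.length_singleton] at hk
      rcases List.mem_append.mp hpm with h | h
      · have hb := hbound p h
        have hklt : k < tmp.length := by omega
        rw [List.getElem_append_left hklt]
        exact hmax p h k hklt h2
      · simp only [List.mem_singleton] at h
        subst h
        simp only at h2
        have hkeq : k = tmp.length := by omega
        subst hkeq
        rw [List.getElem_concat_length]
        rfl
  · -- replace case
    rw [if_neg hcase]
    have hposlt : pos tmp x < tmp.length := by omega
    have hxle : tmp[pos tmp x] ≤ x := by
      have := hchar (pos tmp x) hposlt; omega
    have hget : ∀ (i : Nat) (hi : i < tmp.length),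
        (tmp.set (pos tmp x) x)[i]'(by simpa using hi) = if pos tmp x = i then x else tmp[i] :=
      fun i hi => by rw [List.getElem_set]
    refine ⟨?_, ?_, ?_, ?_⟩
    · rw [List.pairwise_iff_getElem]
      intro i j hi hj hij
      simp only [List.length_set] at hi hj
      rw [hget i hi, hget j hj]
      have hde := List.pairwise_iff_getElem.mp hp
      by_cases h1 : pos tmp x = i
      · rw [if_pos h1, if_neg (by omega)]
        have := hde i j hi hj hij
        subst h1; omega
      · rw [if_neg h1]
        by_cases h2 : pos tmp x = j
        · rw [if_pos h2]
          have : x < tmp[i] := (hchar i hi).mp (by omega)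
          omega
        · rw [if_neg h2]; exact hde i j hi hj hij
    · intro p hpm
      rcases List.mem_append.mp hpm with h | h
      · have := hbound p h; simp; omega
      · simp only [List.mem_singleton] at h; subst h; simp; omega
    · intro k hk
      simp only [List.length_set] at hk
      by_cases h : pos tmp x = k
      · refine ⟨(x, (pos tmp x : Int) + 1), List.mem_append_right _ (by simp), by simp [h], ?_⟩
        rw [hget k hk, if_pos h]
      · obtain ⟨p, hpm, h2, h1⟩ := hclass k hk
        exact ⟨p, List.mem_append_left _ hpm, h2, by rw [hget k hk, if_neg h]; exact h1⟩
    · intro p hpm k hk h2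
      simp only [List.length_set] at hk
      rw [hget k hk]
      rcases List.mem_append.mp hpm with h | h
      · by_cases hpk : pos tmp x = k
        · rw [if_pos hpk]
          have := hmax p h k hk h2
          subst hpk; omega
        · rw [if_neg hpk]; exact hmax p h k hk h2
      · simp only [List.mem_singleton] at h
        subst h
        simp only at h2
        have : pos tmp x = k := by omega
        rw [if_pos this]

lemma fold_both (l : List Int) : ∀ (dp : List (Int × Int)) (tmp : List Int), DPInv dp tmp →
    l.foldl aStep tmp = l.foldl pstep tmp ∧ DPInv (l.foldl bStep dp) (l.foldl pstep tmp) := by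
  induction l with
  | nil => intro dp tmp h; exact ⟨rfl, h⟩
  | cons x t ih =>
    intro dp tmp h
    have hstep := DPInv_step dp tmp x h
    have := ih (bStep dp x) (pstep tmp x) hstep
    refine ⟨?_, this.2⟩
    simp only [List.foldl_cons]
    rw [aStep_eq_pstep tmp x h.1]
    exact this.1

lemma fmax_g_mono : ∀ (b : Int) (p : Int × Int), b ≤ (if b < p.2 then p.2 else b) := by
  intro b p; split <;> omega

lemma final_max (dp : List (Int × Int)) (tmp : List Int) (hInv : DPInv dp tmp) :
    dp.foldl (fun best p => if best < p.2 then p.2 else best) 0 = (tmp.length : Int) := by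
  obtain ⟨hp, hbound, hclass, hmax⟩ := hInv
  apply le_antisymm
  · apply foldl_le_bound _ _ dp
    · intro b p hpm hb
      split
      · exact (hbound p hpm).2
      · exact hb
    · positivity
  · rcases Nat.eq_zero_or_pos tmp.length with h0 | h0
    · rw [h0]; exact_mod_cast foldl_ge_init _ fmax_g_mono dp 0
    · obtain ⟨p, hpm, h2, _⟩ := hclass (tmp.length - 1) (by omega)
      apply foldl_ge_mem _ fmax_g_mono dp p hpm
      intro b
      by_cases hb : b < p.2
      · rw [if_pos hb]; omega
      · rw [if_neg hb]; omega

lemma DPInv_nil : DPInv [] [] := by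
  refine ⟨List.Pairwise.nil, by simp, by simp, by simp⟩

-- ===== VERDICT (by name: the statement is the Claim_ definition above) =====
theorem solution_spec : Claim_equal_solution := by
  intro arr _
  unfold Spec_solution solution solution_alt
  obtain ⟨heq, hInv⟩ := fold_both arr [] [] DPInv_nil
  rw [heq, final_max (arr.foldl bStep []) (arr.foldl pstep []) hInv]
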